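-- pv_equiv track=rewrite | github.com/EnzoPegnolato/Coursera | Menor-Nome.py | menor_nome
-- ===== SOURCE A (Python) =====
-- def menor_nome(nomes):
--     lista = []
--     for i in nomes:
--         a = i.strip()
--         b = len(a)
--         lista.append(b)
--     d = min(lista)
--     pos = lista.index(d)
--     e = nomes[pos]
--     m = e.title().strip()
--     return m
-- ===== SOURCE B (Python) =====
-- def menor_nome(nomes):
--     best = nomes[0]
--     best_len = len(best.strip())
--     for n in nomes[1:]:
--         l = len(n.strip())
--         if l < best_len:
--             best = n
--             best_len = l
--     return best.title().strip()
-- ===== Notes on version B (the rewrite author's own statement) =====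
-- stated objective: simpler
-- what changed: Single pass tracking the current best name and its stripped length (strict-less update keeps the first minimum), instead of building a separate list of lengths and re-scanning it with min and list.index.
-- outside the precondition, e.g. on menor_nome([]): A raises ValueError, B raises IndexError
import Mathlib
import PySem

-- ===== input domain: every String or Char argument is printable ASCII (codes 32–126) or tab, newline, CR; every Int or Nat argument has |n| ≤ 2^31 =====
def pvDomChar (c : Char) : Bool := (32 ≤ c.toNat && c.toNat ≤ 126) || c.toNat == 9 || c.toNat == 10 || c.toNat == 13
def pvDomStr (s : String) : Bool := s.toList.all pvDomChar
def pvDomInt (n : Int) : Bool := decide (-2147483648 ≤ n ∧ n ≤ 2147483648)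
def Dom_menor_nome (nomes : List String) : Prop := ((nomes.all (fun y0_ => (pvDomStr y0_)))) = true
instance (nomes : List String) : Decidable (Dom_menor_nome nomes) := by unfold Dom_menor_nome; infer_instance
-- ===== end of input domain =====

-- B replaces A's length-list + min + list.index re-scans by a single pass keeping the first
-- strictly-smallest stripped-length name; objective: simpler.


-- shared helper: Python str.title(), ported by hand (exact on ASCII, where the cased
-- characters are exactly the letters): a letter after a non-letter is uppercased,
-- any other letter is lowercased.
def pyTitleChars : Bool → List Char → List Char
  | _, [] => []
  | prevCased, c :: cs =>
      (if prevCased then PySem.Chars.lowerChar c else PySem.Chars.upperChar c) ::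
        pyTitleChars (PySem.Chars.isalpha c) cs

def pyTitle (s : String) : String := String.ofList (pyTitleChars false s.toList)

-- ===== PORT A =====
def menor_nome (nomes : List String) : String :=
  let lista : List Nat := nomes.foldl (fun acc i => acc ++ [(PySem.Str.strip i).length]) []
  match PySem.List.min? lista (fun x => x) with
  | none => ""        -- min([]) raises ValueError; excluded by Pre_
  | some d =>
    match PySem.List.index? lista d with
    | none => ""      -- unreachable (d ∈ lista)
    | some pos =>
      match PySem.List.pyGet? nomes (pos : Int) with
      | none => ""    -- unreachable (pos < len)
      | some e => PySem.Str.strip (pyTitle e)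

-- ===== PORT B =====
def menor_nome_alt (nomes : List String) : String :=
  match PySem.List.pyGet? nomes (0 : Int) with
  | none => ""        -- nomes[0] raises IndexError; excluded by Pre_
  | some h =>
    let best := (PySem.List.slice nomes (some 1) none).foldl
      (fun (b : String × Nat) n =>
        let l := (PySem.Str.strip n).length
        if l < b.2 then (n, l) else b)
      (h, (PySem.Str.strip h).length)
    PySem.Str.strip (pyTitle best.1)

-- ===== PRECONDITION & SPEC =====
-- Pre_ excludes only the empty list, on which A raises ValueError (min of an empty list)
-- and B raises IndexError (nomes[0]).
def Pre_menor_nome (nomes : List String) : Prop := nomes ≠ []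
instance (nomes : List String) : Decidable (Pre_menor_nome nomes) := by
  unfold Pre_menor_nome; infer_instance
def pvWitness_menor_nome : List String := ["Ana maria", "bob", "  cy  "]
def Spec_menor_nome (nomes : List String) (out : String) : Prop := out = menor_nome_alt nomes
instance (nomes : List String) (out : String) : Decidable (Spec_menor_nome nomes out) := by
  unfold Spec_menor_nome; infer_instance

-- ===== CLAIM (what is proved, stated in full; the proofs are below) =====
def Claim_equal_menor_nome : Prop := ∀ (nomes : List String), Dom_menor_nome nomes → Pre_menor_nome nomes → Spec_menor_nome nomes (menor_nome nomes)

-- ===== LEMMAS AND PROOFS =====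

-- stripped length of a name
def pvF (s : String) : Nat := (PySem.Str.strip s).length

-- minimum of pvF over b :: l, as A's running foldl computes it
def pvMin (b : String) (l : List String) : Nat := (l.map pvF).foldl min (pvF b)

-- first element of b :: l with strictly smallest pvF (the value B's fold tracks)
def pvSel (b : String) : List String → String
  | [] => b
  | x :: t => if pvF x < pvF b then pvSel x t else pvSel b t

theorem pvFoldlMin_le_init (l : List Nat) (a : Nat) : l.foldl min a ≤ a := by
  induction l generalizing a with
  | nil => simp
  | cons x t ih => exact le_trans (ih (min a x)) (min_le_left _ _)

theorem pvFoldlMin_le_mem (l : List Nat) (a y : Nat) (hy : y ∈ l) : l.foldl min a ≤ y := by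
  induction l generalizing a with
  | nil => simp at hy
  | cons x t ih =>
      rcases List.mem_cons.1 hy with rfl | hy'
      · exact le_trans (pvFoldlMin_le_init t _) (min_le_right _ _)
      · exact ih _ hy'

theorem pvMin_le (b : String) (l : List String) (y : String) (hy : y ∈ b :: l) :
    pvMin b l ≤ pvF y := by
  rcases List.mem_cons.1 hy with rfl | hy'
  · exact pvFoldlMin_le_init _ _
  · exact pvFoldlMin_le_mem _ _ _ (List.mem_map_of_mem hy')

theorem pvSel_of_no_lt (b : String) (l : List String)
    (h : ∀ y ∈ l, ¬ pvF y < pvF b) : pvSel b l = b := by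
  induction l with
  | nil => rfl
  | cons x t ih =>
      have hx := h x (by simp)
      simp only [pvSel, if_neg hx]
      exact ih fun y hy => h y (by simp [hy])

theorem pvBindMap (o : Option Nat) (y : String) (l : List String) :
    (o.map (· + 1)).bind (fun pos => (y :: l)[pos]?) = o.bind (fun k => l[k]?) := by
  cases o <;> simp

-- A's index-of-min lookup returns exactly the element B's pass selects
theorem pvA_eq_sel (t : List String) (h : String) :
    (PySem.List.index? ((h :: t).map pvF) (pvMin h t)).bind
      (fun pos => (h :: t)[pos]?) = some (pvSel h t) := by
  induction t generalizing h with
  | nil =>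
      simp [pvMin, pvSel]
  | cons x t' ih =>
      have hmin : pvMin h (x :: t') = (t'.map pvF).foldl min (min (pvF h) (pvF x)) := by
        simp [pvMin]
      by_cases hlt : pvF x < pvF h
      · -- the new element is strictly smaller: the minimum lives in x :: t'
        have hm : pvMin h (x :: t') = pvMin x t' := by
          rw [hmin, min_eq_right (le_of_lt hlt)]; rfl
        have hne : pvF h ≠ pvMin x t' := by
          have h1 : pvMin x t' ≤ pvF x := pvMin_le x t' x (by simp)
          omega
        rw [hm]
        rw [List.map_cons, PySem.List.index?_cons_of_ne _ hne, pvBindMap]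
        rw [show pvSel h (x :: t') = pvSel x t' from by simp [pvSel, if_pos hlt]]
        exact ih x
      · -- head stays the running minimum candidate
        have hm : pvMin h (x :: t') = pvMin h t' := by
          rw [hmin, min_eq_left (le_of_not_gt hlt)]; rfl
        rw [hm]
        rw [show pvSel h (x :: t') = pvSel h t' from by simp [pvSel, if_neg hlt]]
        by_cases hh : pvF h = pvMin h t'
        · -- the head itself attains the minimum: index 0, and pvSel keeps h
          have hsel : pvSel h t' = h := by
            apply pvSel_of_no_lt
            intro y hy
            have := pvMin_le h t' y (by simp [hy])
            omega
          rw [List.map_cons, show pvF h = pvMin h t' from hh, PySem.List.index?_cons_self]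
          simp [hsel]
        · -- the minimum is strictly below the head (hence below x too): shift by one
          have hmlt : pvMin h t' < pvF h := lt_of_le_of_ne (pvMin_le h t' h (by simp)) (Ne.symm hh)
          have hxne : pvF x ≠ pvMin h t' := by
            have := le_of_not_gt hlt; omega
          have ih' := ih h
          rw [List.map_cons, PySem.List.index?_cons_of_ne _ hh, pvBindMap] at ih'
          rw [List.map_cons, List.map_cons, PySem.List.index?_cons_of_ne _ hh,
            PySem.List.index?_cons_of_ne _ hxne, pvBindMap, pvBindMap]
          exact ih'
  
-- B's fold carries (current best, its stripped length)
theorem pvB_fold (t : List String) (b : String) :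
    t.foldl
      (fun (st : String × Nat) n =>
        let l := (PySem.Str.strip n).length
        if l < st.2 then (n, l) else st)
      (b, (PySem.Str.strip b).length) = (pvSel b t, pvF (pvSel b t)) := by
  induction t generalizing b with
  | nil => simp [pvSel, pvF]
  | cons x t' ih =>
      simp only [List.foldl_cons]
      by_cases hlt : pvF x < pvF b
      · rw [if_pos (by simpa [pvF] using hlt)]
        rw [show pvSel b (x :: t') = pvSel x t' from by simp [pvSel, if_pos hlt]]
        exact ih x
      · rw [if_neg (by simpa [pvF] using hlt)]
        rw [show pvSel b (x :: t') = pvSel b t' from by simp [pvSel, if_neg hlt]]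
        exact ih b

theorem pvFoldlAppend (l : List String) (acc : List Nat) :
    l.foldl (fun acc i => acc ++ [(PySem.Str.strip i).length]) acc = acc ++ l.map pvF := by
  induction l generalizing acc with
  | nil => simp
  | cons x t ih => simp [ih, pvF]

-- ===== VERDICT (by name: the statement is the Claim_ definition above) =====
theorem menor_nome_spec : Claim_equal_menor_nome := by
  intro nomes _ hpre
  unfold Spec_menor_nome
  cases nomes with
  | nil => exact absurd rfl hpre
  | cons h t =>
      -- A's side
      have hlista : (h :: t).foldl (fun acc i => acc ++ [(PySem.Str.strip i).length]) [] =
          (h :: t).map pvF := by simpa using pvFoldlAppend (h :: t) []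
      have hminq : PySem.List.min? ((h :: t).map pvF) (fun x => x) = some (pvMin h t) := by
        rw [List.map_cons, PySem.List.min?_id_cons]; rfl
      have hA := pvA_eq_sel t h
      -- reduce A
      unfold menor_nome
      simp only [hlista, hminq]
      cases hidx : PySem.List.index? ((h :: t).map pvF) (pvMin h t) with
      | none => rw [hidx] at hA; simp at hA
      | some pos =>
          rw [hidx] at hA
          simp only [Option.bind_some] at hA
          simp only [PySem.List.pyGet?_natCast, hA]
          -- B's side
          unfold menor_nome_alt
          rw [show PySem.List.pyGet? (h :: t) (0 : Int) = some h from by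
            simp]
          rw [show PySem.List.slice (h :: t) (some 1) none = t from by
            simp [PySem.List.slice_from]]
          simp only [pvB_fold]
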